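-- pv_equiv track=rewrite | github.com/Charlesyu153/yc-cli | PCF/001prepare_csd(latest).py | split_marker_tokens
-- ===== SOURCE A (Python) =====
-- from typing import Dict, Iterable, List, Optional
--
-- def split_marker_tokens(text: str) -> List[str]:
--     """Split 'Name' strings into marker tokens terminated by +/-."""
--     tokens: List[str] = []
--     buff: List[str] = []
--     for char in text:
--         buff.append(char)
--         if char in "+-":
--             token = "".join(buff).strip()
--             if token:
--                 tokens.append(token)
--             buff.clear()
--     if buff:
--         tail = "".join(buff).strip()
--         if tail:
--             tokens.append(tail)
--     return tokens
-- ===== SOURCE B (Python) =====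
-- def split_marker_tokens(text):
--     """Split 'Name' strings into marker tokens terminated by +/-."""
--     tokens = []
--     rest = text
--     while rest:
--         p = next((i for i, c in enumerate(rest) if c in "+-"), -1)
--         if p == -1:
--             chunk, rest = rest, ""
--         else:
--             chunk, rest = rest[:p + 1], rest[p + 1:]
--         token = chunk.strip()
--         if token:
--             tokens.append(token)
--     return tokens
-- ===== Notes on version B (the rewrite author's own statement) =====
-- stated objective: alternative
-- what changed: B replaces A's char-by-char buffer accumulation with a scan-for-next-delimiter-and-slice loop: it repeatedly finds the first +/- in the remaining text, slices off that chunk (delimiter included), strips it and drops it if empty; no character buffer is maintained.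
import Mathlib
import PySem

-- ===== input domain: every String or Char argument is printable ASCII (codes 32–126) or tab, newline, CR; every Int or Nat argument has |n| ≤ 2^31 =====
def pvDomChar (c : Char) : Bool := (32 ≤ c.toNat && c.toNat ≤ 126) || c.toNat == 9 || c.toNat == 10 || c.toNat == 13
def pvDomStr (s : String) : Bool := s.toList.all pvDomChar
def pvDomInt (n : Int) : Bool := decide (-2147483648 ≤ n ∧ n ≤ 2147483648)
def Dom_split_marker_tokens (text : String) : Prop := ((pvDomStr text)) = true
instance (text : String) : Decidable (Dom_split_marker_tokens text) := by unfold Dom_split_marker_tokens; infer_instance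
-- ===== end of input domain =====

-- B replaces A's char-by-char buffer accumulation with a find-next-delimiter-and-slice loop
-- over the remaining text (alternative structure, same cost class).

-- ===== PORT A =====
-- one loop iteration: append char to buff; on '+'/'-' flush the stripped buffer as a token
def aStep (s : List String × List Char) (c : Char) : List String × List Char :=
  let buff := s.2 ++ [c]
  if c = '+' ∨ c = '-' then
    let token := PySem.Chars.strip buff
    ((if token ≠ [] then s.1 ++ [String.ofList token] else s.1), [])
  else (s.1, buff)

-- the trailing 'if buff: …' of A
def aFlush (s : List String × List Char) : List String :=
  if s.2 ≠ [] then
    let tail := PySem.Chars.strip s.2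
    if tail ≠ [] then s.1 ++ [String.ofList tail] else s.1
  else s.1

def split_marker_tokens (text : String) : List String :=
  aFlush (text.toList.foldl aStep ([], []))

-- ===== PORT B =====
-- Source B's while loop: find first '+'/'-' in rest, slice off the chunk (delimiter included),
-- strip it, keep if non-empty, continue on the remainder.
def altGo (tokens : List String) (rest : List Char) : List String :=
  match rest with
  | [] => tokens
  | c :: cs =>
    match (c :: cs).findIdx? (fun c => c = '+' || c = '-') with
    | none =>
      let token := PySem.Chars.strip (c :: cs)
      if token ≠ [] then tokens ++ [String.ofList token] else tokens
    | some p =>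
      let token := PySem.Chars.strip ((c :: cs).take (p + 1))
      altGo (if token ≠ [] then tokens ++ [String.ofList token] else tokens) ((c :: cs).drop (p + 1))
termination_by rest.length
decreasing_by simp

def split_marker_tokens_alt (text : String) : List String := altGo [] text.toList

-- ===== PRECONDITION & SPEC =====
def Spec_split_marker_tokens (text : String) (out : List String) : Prop := out = split_marker_tokens_alt text
instance (text : String) (out : List String) : Decidable (Spec_split_marker_tokens text out) := by unfold Spec_split_marker_tokens; infer_instance

-- ===== CLAIM (what is proved, stated in full; the proofs are below) =====
def Claim_equal_split_marker_tokens : Prop := ∀ (text : String), Dom_split_marker_tokens text → Spec_split_marker_tokens text (split_marker_tokens text)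

-- ===== LEMMAS AND PROOFS =====

lemma altGo_nil (toks : List String) : altGo toks [] = toks := by
  unfold altGo
  rfl


-- invariant: with a delimiter-free buffer, A's remaining fold + flush equals B's loop on buff ++ cs
lemma aFold_eq_altGo (cs : List Char) (toks : List String) (buff : List Char)
    (hb : ∀ c ∈ buff, ¬(c = '+' ∨ c = '-')) :
    aFlush (cs.foldl aStep (toks, buff)) = altGo toks (buff ++ cs) := by
  induction cs generalizing toks buff with
  | nil =>
    have hnone : buff.findIdx? (fun c => c = '+' || c = '-') = none := by
      rw [List.findIdx?_eq_none_iff]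
      intro x hx
      have := hb x hx
      simp_all
    cases buff with
    | nil => simp [aFlush, altGo_nil]
    | cons b bs =>
      simp only [List.foldl_nil, List.append_nil]
      conv_rhs => unfold altGo
      rw [hnone]
      simp [aFlush]
  | cons c cs ih =>
    by_cases hc : c = '+' ∨ c = '-'
    · have hnone : buff.findIdx? (fun c => c = '+' || c = '-') = none := by
        rw [List.findIdx?_eq_none_iff]; intro x hx; have := hb x hx; simp_all
      have hidx : (buff ++ c :: cs).findIdx? (fun c => c = '+' || c = '-')
          = some buff.length := by
        rw [List.findIdx?_append, hnone]
        simp [List.findIdx?_cons]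
        rcases hc with h | h <;> simp [h]
      rw [List.foldl_cons]
      have hstep : aStep (toks, buff) c
          = ((if PySem.Chars.strip (buff ++ [c]) ≠ [] then
                toks ++ [String.ofList (PySem.Chars.strip (buff ++ [c]))] else toks), []) := by
        simp [aStep, hc]
      rw [hstep, ih _ _ (by simp)]
      rcases List.exists_cons_of_ne_nil (show buff ++ c :: cs ≠ [] by simp) with ⟨y, ys, hys⟩
      conv_rhs => rw [hys]; unfold altGo
      rw [← hys, hidx]
      have htake : (buff ++ c :: cs).take (buff.length + 1) = buff ++ [c] := by
        rw [show buff ++ c :: cs = (buff ++ [c]) ++ cs by simp]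
        rw [List.take_append_of_le_length (by simp)]
        simp
      have hdrop : (buff ++ c :: cs).drop (buff.length + 1) = cs := by
        rw [show buff ++ c :: cs = (buff ++ [c]) ++ cs by simp]
        rw [List.drop_append_of_le_length (by simp)]
        simp
      simp only [htake, hdrop]
      simp
    · rw [List.foldl_cons]
      have hstep : aStep (toks, buff) c = (toks, buff ++ [c]) := by
        simp [aStep, hc]
      have hb' : ∀ x ∈ buff ++ [c], ¬(x = '+' ∨ x = '-') := by
        intro x hx
        rw [List.mem_append] at hx
        cases hx with
        | inl h => exact hb x h
        | inr h => simp at h; subst h; exact hc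
      rw [hstep, ih _ _ hb', List.append_assoc, List.singleton_append]

-- ===== VERDICT (by name: the statement is the Claim_ definition above) =====
theorem split_marker_tokens_spec : Claim_equal_split_marker_tokens := by
  intro text _
  unfold Spec_split_marker_tokens split_marker_tokens split_marker_tokens_alt
  simpa using aFold_eq_altGo text.toList [] [] (by simp)
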